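-- pv_equiv track=rewrite | github.com/kingjinlong/myGoBTB | test_tick.py | quchong
-- ===== SOURCE A (Python) =====
-- def quchong(arr):
--     for i in range(0,len(arr)):
--         for j in range(i+1,len(arr)):
--             if arr[j] == arr[i]:
--                 arr[j] += 1
--     if len(set(arr))!=len(arr):
--         quchong(arr)
--     return arr
-- ===== SOURCE B (Python) =====
-- def quchong(arr):
--     seen = set()
--     for i, v in enumerate(arr):
--         while v in seen:
--             v += 1
--         arr[i] = v
--         seen.add(v)
--     return arr
-- ===== Notes on version B (the rewrite author's own statement) =====
-- stated objective: faster
-- what changed: Replaced A's repeated quadratic fix-up passes with recursion-until-fixpoint by a single left-to-right greedy pass that assigns each element the smallest value >= its original not already taken by an earlier index, tracked in a seen set.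
import Mathlib
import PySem

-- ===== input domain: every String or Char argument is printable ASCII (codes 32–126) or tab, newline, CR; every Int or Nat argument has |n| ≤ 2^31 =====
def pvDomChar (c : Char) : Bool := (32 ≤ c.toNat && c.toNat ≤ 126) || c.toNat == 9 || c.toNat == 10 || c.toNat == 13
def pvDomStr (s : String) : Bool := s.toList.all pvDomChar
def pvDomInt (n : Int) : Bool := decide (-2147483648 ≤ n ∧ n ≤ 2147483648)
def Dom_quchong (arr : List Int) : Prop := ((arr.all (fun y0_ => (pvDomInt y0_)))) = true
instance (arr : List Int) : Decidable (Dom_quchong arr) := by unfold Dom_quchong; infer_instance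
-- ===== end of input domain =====

-- B replaces A's repeated quadratic fix-up passes (recursion until no duplicates remain) by a
-- single left-to-right greedy pass over a seen-set (same return value; like A, B mutates the
-- argument list in place in Python — the equivalence proved here is about the return value).

-- ===== PORT A =====
-- A's inner body: `for j in range(i+1,len(arr)): if arr[j] == arr[i]: arr[j] += 1`
def stepA (i : Nat) (t : List Int) (j : Nat) : List Int :=
  if t.getD j 0 == t.getD i 0 then t.set j (t.getD j 0 + 1) else t

def quchongInner (t : List Int) (i : Nat) : List Int :=
  (List.range' (i+1) (t.length - (i+1))).foldl (stepA i) t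

def quchongPass (a : List Int) : List Int :=
  (List.range a.length).foldl quchongInner a

-- A's recursion `if len(set(arr))!=len(arr): quchong(arr)`, totalized with an explicit fuel;
-- the lemmas below the claim block prove this purely arithmetic fuel bound always suffices,
-- so the port returns exactly what A's unbounded recursion returns.
def quchongFuel : Nat → List Int → List Int
  | 0, arr => arr
  | Nat.succ n, arr =>
    let a := quchongPass arr
    if (PySem.Set.ofList a).length ≠ a.length then quchongFuel n a else a

def quchong (arr : List Int) : List Int :=
  quchongFuel (((arr.length : Int) * (arr.foldl max 0 + arr.length) - arr.sum).toNat + 1) arr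

-- ===== PORT B =====
-- Helper for B's `while v in seen: v += 1`; its termination lemmas must precede it.
lemma filt_shift (v : Int) (l : List Int) :
    l.filter (fun x => decide (v+1 ≤ x)) = l.filter (fun x => decide (v < x)) := by
  apply List.filter_congr; intro x _; simp only [decide_eq_decide]; omega
lemma bump_dec (seen : List Int) (v : Int) (h : v ∈ seen) :
    (seen.filter (fun x => decide (v+1 ≤ x))).length < (seen.filter (fun x => decide (v ≤ x))).length := by
  rw [filt_shift]
  induction seen with
  | nil => cases h
  | cons a t ih =>
    simp only [List.filter_cons]
    rcases List.mem_cons.1 h with rfl | hmem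
    · have hm : (t.filter (fun x => decide (v < x))).length ≤ (t.filter (fun x => decide (v ≤ x))).length := by
        apply List.Sublist.length_le; apply List.monotone_filter_right
        intro x hx; simp at hx ⊢; omega
      simp; omega
    · have := ih hmem
      by_cases h2 : v < a
      · have h1 : v ≤ a := by omega
        simp [h1, h2]; omega
      · by_cases h1 : v ≤ a <;> simp [h1, h2] <;> omega
def bump (seen : List Int) (v : Int) : Int :=
  if v ∈ seen then bump seen (v+1) else v
termination_by (seen.filter (fun x => decide (v ≤ x))).length
decreasing_by exact bump_dec seen v (by assumption)

-- Source B's loop over `enumerate(arr)`: bump each value past the seen-set, emit it, add it to seen.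
def altGo (seen : List Int) : List Int → List Int
  | [] => []
  | v :: rest => bump seen v :: altGo (PySem.Set.add seen (bump seen v)) rest

def quchong_alt (arr : List Int) : List Int :=
  altGo PySem.Set.empty arr

-- ===== PRECONDITION & SPEC =====
def Spec_quchong (arr : List Int) (out : List Int) : Prop := out = quchong_alt arr
instance (arr : List Int) (out : List Int) : Decidable (Spec_quchong arr out) := by
  unfold Spec_quchong; infer_instance

-- ===== CLAIM =====
def Claim_equal_quchong : Prop := ∀ (arr : List Int), Dom_quchong arr → Spec_quchong arr (quchong arr)

-- ===== LEMMAS AND PROOFS =====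
def seenAfter (seen : List Int) (l : List Int) : List Int :=
  l.foldl (fun s x => PySem.Set.add s (bump s x)) seen

lemma bump_eq (seen : List Int) (v : Int) :
    bump seen v = if v ∈ seen then bump seen (v+1) else v := by rw [bump]
lemma bump_ge (seen : List Int) (v : Int) : v ≤ bump seen v := by
  induction v using bump.induct seen with
  | case1 v h ih => rw [bump_eq, if_pos h]; omega
  | case2 v h => rw [bump_eq, if_neg h]
lemma bump_mem_of_lt (seen : List Int) (v w : Int) (h1 : v ≤ w) (h2 : w < bump seen v) : w ∈ seen := by
  induction v using bump.induct seen with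
  | case1 v h ih =>
    rw [bump_eq, if_pos h] at h2
    rcases eq_or_lt_of_le h1 with rfl | hlt
    · exact h
    · exact ih (by omega) h2
  | case2 v h => rw [bump_eq, if_neg h] at h2; omega
lemma bump_le (seen : List Int) (v : Int) :
    bump seen v ≤ v + ((seen.filter (fun x => decide (v ≤ x))).length : Int) := by
  induction v using bump.induct seen with
  | case1 v h ih =>
    rw [bump_eq, if_pos h]
    have := bump_dec seen v h
    omega
  | case2 v h => rw [bump_eq, if_neg h]; omega
lemma bump_le_len (seen : List Int) (v : Int) : bump seen v ≤ v + (seen.length : Int) := by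
  have h1 := bump_le seen v
  have h2 : (seen.filter (fun x => decide (v ≤ x))).length ≤ seen.length :=
    List.length_filter_le _ _
  omega
lemma seenAfter_cons (seen : List Int) (x : Int) (xs : List Int) :
    seenAfter seen (x :: xs) = seenAfter (PySem.Set.add seen (bump seen x)) xs := rfl
lemma altGo_append (seen : List Int) (a b : List Int) :
    altGo seen (a ++ b) = altGo seen a ++ altGo (seenAfter seen a) b := by
  induction a generalizing seen with
  | nil => rfl
  | cons x xs ih => simp [altGo, seenAfter_cons, ih]
lemma mem_seenAfter_of_mem (seen : List Int) (l : List Int) (v : Int) (h : v ∈ seen) :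
    v ∈ seenAfter seen l := by
  induction l generalizing seen with
  | nil => exact h
  | cons x xs ih =>
    rw [seenAfter_cons]
    exact ih _ ((PySem.Set.mem_add _ _ _).2 (Or.inl h))
lemma mem_seenAfter_of_mem_list (seen : List Int) (l : List Int) (v : Int) (h : v ∈ l) :
    v ∈ seenAfter seen l := by
  induction l generalizing seen with
  | nil => cases h
  | cons x xs ih =>
    rw [seenAfter_cons]
    rcases List.mem_cons.1 h with rfl | hmem
    · apply mem_seenAfter_of_mem
      rcases eq_or_lt_of_le (bump_ge seen v) with hb | hb
      · exact (PySem.Set.mem_add _ _ _).2 (Or.inr hb)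
      · exact (PySem.Set.mem_add _ _ _).2 (Or.inl (bump_mem_of_lt seen v v le_rfl hb))
    · exact ih _ hmem
lemma altGo_skip (seen : List Int) (l2 : List Int) (v : Int) (l3 : List Int) (h : v ∈ seen) :
    altGo seen (l2 ++ (v+1) :: l3) = altGo seen (l2 ++ v :: l3) := by
  induction l2 generalizing seen with
  | nil =>
    simp only [List.nil_append, altGo]
    rw [show bump seen v = bump seen (v+1) by rw [bump_eq, if_pos h]]
  | cons x xs ih =>
    simp only [List.cons_append, altGo]
    rw [ih _ ((PySem.Set.mem_add _ _ _).2 (Or.inl h))]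
lemma altGo_surgery (p l2 : List Int) (v : Int) (l3 : List Int) (h : v ∈ p) :
    altGo [] (p ++ l2 ++ (v+1) :: l3) = altGo [] (p ++ l2 ++ v :: l3) := by
  rw [List.append_assoc, List.append_assoc, altGo_append [] p _, altGo_append [] p _,
    altGo_skip _ l2 v l3 (mem_seenAfter_of_mem_list _ _ _ h)]

lemma sum_set_incr (t : List Int) (j : Nat) (hj : j < t.length) :
    (t.set j (t.getD j 0 + 1)).sum = t.sum + 1 := by
  have hdec : t.sum = (t.take j).sum + t[j] + (t.drop (j+1)).sum := by
    conv_lhs => rw [← List.take_append_drop j t, ← List.getElem_cons_drop hj]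
    rw [List.sum_append, List.sum_cons]; ring
  rw [List.sum_set, if_pos hj, List.getD_eq_getElem t 0 hj]
  omega

-- the greedy result is unchanged by one firing bump of A's pass
lemma greedy_set (s : List Int) (i j : Nat) (hij : i < j) (hj : j < s.length)
    (heq : s.getD j 0 = s.getD i 0) :
    altGo [] (s.set j (s.getD j 0 + 1)) = altGo [] s := by
  have hi : i < s.length := lt_trans hij hj
  have hv : s.getD j 0 = s[i] := by rw [heq, List.getD_eq_getElem s 0 hi]
  have hset : s.set j (s.getD j 0 + 1) = s.take j ++ (s.getD j 0 + 1) :: s.drop (j+1) := by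
    rw [List.set_eq_take_append_cons_drop, if_pos hj]
  have hs : s = s.take j ++ s.getD j 0 :: s.drop (j+1) := by
    conv_lhs => rw [← List.take_append_drop j s]
    rw [← List.getElem_cons_drop hj, List.getD_eq_getElem s 0 hj]
  have htj : s.take j = s.take (i+1) ++ (s.take j).drop (i+1) := by
    conv_lhs => rw [← List.take_append_drop (i+1) (s.take j)]
    rw [List.take_take, min_eq_left (by omega)]
  have hmem : s.getD j 0 ∈ s.take (i+1) := by
    rw [hv]
    have hilt : i < (s.take (i+1)).length := by
      rw [List.length_take]; omega
    have : (s.take (i+1))[i] = s[i] := List.getElem_take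
    rw [← this]; exact List.getElem_mem hilt
  rw [hset]; conv_rhs => rw [hs]
  rw [htj, List.append_assoc, List.append_assoc]
  rw [← List.append_assoc, ← List.append_assoc]
  exact altGo_surgery _ _ _ _ hmem

lemma stepA_cases (i : Nat) (t : List Int) (j : Nat) (hij : i < j) (hj : j < t.length) :
    stepA i t j = t ∨
      ((stepA i t j).sum = t.sum + 1 ∧ (stepA i t j).length = t.length ∧
        altGo [] (stepA i t j) = altGo [] t) := by
  unfold stepA
  by_cases h : t.getD j 0 == t.getD i 0
  · rw [if_pos h]
    refine Or.inr ⟨sum_set_incr t j hj, List.length_set .., greedy_set t i j hij hj (by simpa using h)⟩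
  · rw [if_neg h]; exact Or.inl rfl

def Pinv (a t : List Int) : Prop :=
  t.length = a.length ∧ altGo [] t = altGo [] a ∧ a.sum ≤ t.sum ∧ (t.sum = a.sum → t = a)

lemma stepA_pres (a : List Int) (i j : Nat) (hij : i < j) (t : List Int)
    (ht : Pinv a t) (hj : j < t.length) : Pinv a (stepA i t j) := by
  obtain ⟨h1, h2, h3, h4⟩ := ht
  rcases stepA_cases i t j hij hj with he | ⟨hs, hl, hg⟩
  · rw [he]; exact ⟨h1, h2, h3, h4⟩
  · refine ⟨hl.trans h1, hg.trans h2, by omega, by omega⟩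

lemma inner_pres (a : List Int) (i : Nat) (t : List Int) (ht : Pinv a t) :
    Pinv a (quchongInner t i) := by
  unfold quchongInner
  apply List.foldlRecOn _ _ ht
  intro u hu j hjmem
  obtain ⟨hs, hb⟩ := List.mem_range'_1.1 hjmem
  exact stepA_pres a i j (by omega) u hu (by have := hu.1; have := ht.1; omega)

lemma pass_inv (a : List Int) : Pinv a (quchongPass a) := by
  unfold quchongPass
  apply List.foldlRecOn _ _ (show Pinv a a from ⟨rfl, rfl, le_rfl, fun _ => rfl⟩)
  intro t ht i _
  exact inner_pres a i t ht

lemma stepA_sum_ge (i : Nat) (t : List Int) (j : Nat) : t.sum ≤ (stepA i t j).sum := by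
  unfold stepA
  split
  · by_cases hj : j < t.length
    · rw [sum_set_incr t j hj]; omega
    · rw [List.set_eq_of_length_le (by omega)]
  · exact le_rfl

lemma sum_le_foldl_step (i : Nat) (l : List Nat) (t : List Int) :
    t.sum ≤ (l.foldl (stepA i) t).sum := by
  induction l generalizing t with
  | nil => exact le_rfl
  | cons j l' ih => exact le_trans (stepA_sum_ge i t j) (ih _)

lemma stepA_from_a (a : List Int) (i j : Nat) :
    stepA i a j = a ∨ (stepA i a j).sum = a.sum + 1 := by
  unfold stepA
  split
  · by_cases hj : j < a.length
    · exact Or.inr (sum_set_incr a j hj)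
    · exact Or.inl (List.set_eq_of_length_le (by omega))
  · exact Or.inl rfl

lemma foldl_step_strict (a : List Int) (i0 j0 : Nat) (hj0 : j0 < a.length)
    (hcond : a.getD j0 0 = a.getD i0 0) :
    ∀ (l : List Nat) (t : List Int), j0 ∈ l → (a.sum < t.sum ∨ t = a) →
      a.sum < (l.foldl (stepA i0) t).sum := by
  intro l
  induction l with
  | nil => intro t h; cases h
  | cons j l' ih =>
    intro t hmem ht
    rcases ht with hlt | rfl
    · simp only [List.foldl_cons]
      have := sum_le_foldl_step i0 l' (stepA i0 t j)
      have := stepA_sum_ge i0 t j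
      omega
    · simp only [List.foldl_cons]
      by_cases hjj : j = j0
      · subst hjj
        have hfire : stepA i0 t j = t.set j (t.getD j 0 + 1) := by
          unfold stepA; rw [if_pos (by simpa using hcond)]
        have : (stepA i0 t j).sum = t.sum + 1 := by rw [hfire, sum_set_incr t j hj0]
        have := sum_le_foldl_step i0 l' (stepA i0 t j)
        omega
      · have hmem' : j0 ∈ l' := by
          rcases List.mem_cons.1 hmem with h | h
          · exact absurd h.symm hjj
          · exact h
        rcases stepA_from_a t i0 j with he | hs
        · rw [he]; exact ih t hmem' (Or.inr rfl)
        · exact ih (stepA i0 t j) hmem' (Or.inl (by omega))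

lemma inner_from_a (a t : List Int) (i : Nat) (h : a.sum < t.sum ∨ t = a) :
    a.sum < (quchongInner t i).sum ∨ quchongInner t i = a := by
  unfold quchongInner
  generalize (List.range' (i+1) (t.length - (i+1))) = l
  induction l generalizing t with
  | nil =>
    rcases h with h | rfl
    · exact Or.inl h
    · exact Or.inr rfl
  | cons j l' ih =>
    simp only [List.foldl_cons]
    rcases h with hlt | rfl
    · exact ih (stepA i t j) (Or.inl (lt_of_lt_of_le hlt (stepA_sum_ge i t j)))
    · rcases stepA_from_a t i j with he | hs
      · rw [he]; exact ih t (Or.inr rfl)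
      · exact ih (stepA i t j) (Or.inl (by omega))

lemma sum_le_inner (t : List Int) (i : Nat) : t.sum ≤ (quchongInner t i).sum :=
  sum_le_foldl_step i _ t

lemma sum_le_foldl_inner (l : List Nat) (t : List Int) :
    t.sum ≤ (l.foldl quchongInner t).sum := by
  induction l generalizing t with
  | nil => exact le_rfl
  | cons i l' ih => exact le_trans (sum_le_inner t i) (ih _)

lemma pass_strict (a : List Int) (i0 j0 : Nat) (hij : i0 < j0) (hj0 : j0 < a.length)
    (hcond : a.getD j0 0 = a.getD i0 0) : a.sum < (quchongPass a).sum := by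
  unfold quchongPass
  have hi0 : i0 ∈ List.range a.length := List.mem_range.2 (by omega)
  generalize hl : List.range a.length = l at hi0
  clear hl
  induction l with
  | nil => cases hi0
  | cons i l' ih =>
    simp only [List.foldl_cons]
    by_cases hii : i = i0
    · have hjr : j0 ∈ List.range' (i0+1) (a.length - (i0+1)) :=
        List.mem_range'_1.2 ⟨by omega, by omega⟩
      have hstep : a.sum < (quchongInner a i).sum := by
        rw [hii]; unfold quchongInner
        exact foldl_step_strict a i0 j0 hj0 hcond _ a hjr (Or.inr rfl)
      have := sum_le_foldl_inner l' (quchongInner a i)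
      omega
    · have hmem' : i0 ∈ l' := by
        rcases List.mem_cons.1 hi0 with h | h
        · exact absurd h.symm hii
        · exact h
      rcases inner_from_a a a i (Or.inr rfl) with h' | h'
      · have := sum_le_foldl_inner l' (quchongInner a i)
        omega
      · rw [h']
        exact ih hmem'

lemma exists_pair_of_not_nodup (a : List Int) (h : ¬ a.Nodup) :
    ∃ i0 j0, i0 < j0 ∧ j0 < a.length ∧ a.getD j0 0 = a.getD i0 0 := by
  rw [List.nodup_iff_injective_getElem] at h
  rw [Function.not_injective_iff] at h
  obtain ⟨x, y, hxy, hne⟩ := h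
  rcases lt_trichotomy x.1 y.1 with hlt | heq | hgt
  · refine ⟨x.1, y.1, hlt, y.2, ?_⟩
    rw [List.getD_eq_getElem a 0 y.2, List.getD_eq_getElem a 0 x.2, hxy]
  · exact absurd (Fin.ext heq) hne
  · refine ⟨y.1, x.1, hgt, x.2, ?_⟩
    rw [List.getD_eq_getElem a 0 y.2, List.getD_eq_getElem a 0 x.2, hxy]

lemma pass_id_of_nodup (a : List Int) (h : a.Nodup) : quchongPass a = a := by
  unfold quchongPass
  apply List.foldlRecOn (motive := fun t => t = a) _ _ rfl
  intro t ht i himem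
  rw [ht]
  unfold quchongInner
  apply List.foldlRecOn (motive := fun t => t = a) _ _ rfl
  intro u hu j hjmem
  rw [hu]
  obtain ⟨hjl, hjr⟩ := List.mem_range'_1.1 hjmem
  have hi : i < a.length := List.mem_range.1 himem
  have hj : j < a.length := by omega
  unfold stepA
  rw [if_neg]
  intro hbeq
  have heq : a[j] = a[i] := by
    rw [← List.getD_eq_getElem a 0 hj, ← List.getD_eq_getElem a 0 hi]
    simpa using hbeq
  have := (List.nodup_iff_injective_getElem.1 h)
    (show a[(⟨j, hj⟩ : Fin a.length).1] = a[(⟨i, hi⟩ : Fin a.length).1] from heq)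
  simp at this
  omega

lemma greedy_sum_ge (l : List Int) : ∀ (seen : List Int), l.sum ≤ (altGo seen l).sum := by
  induction l with
  | nil => intro seen; exact le_rfl
  | cons x xs ih =>
    intro seen
    simp only [altGo, List.sum_cons]
    have := bump_ge seen x
    have := ih (PySem.Set.add seen (bump seen x))
    omega

lemma not_nodup_of_setlen (b : List Int) (h : (PySem.Set.ofList b).length ≠ b.length) :
    ¬ b.Nodup := by
  intro hn
  exact h (by rw [PySem.Set.ofList_eq_self_of_nodup b hn])

lemma pass_measure (a : List Int) (h : ¬ (quchongPass a).Nodup) :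
    ((altGo [] (quchongPass a)).sum - (quchongPass a).sum).toNat
      < ((altGo [] a).sum - a.sum).toNat := by
  obtain ⟨hlen, hg, hle, heq⟩ := pass_inv a
  by_cases hn : a.Nodup
  · rw [pass_id_of_nodup a hn] at h; exact absurd hn h
  · obtain ⟨i0, j0, hij, hj0, hcond⟩ := exists_pair_of_not_nodup a hn
    have hstrict := pass_strict a i0 j0 hij hj0 hcond
    have hbound : (quchongPass a).sum ≤ (altGo [] (quchongPass a)).sum :=
      greedy_sum_ge (quchongPass a) []
    rw [hg] at hbound ⊢
    omega

lemma altGo_id (l : List Int) : ∀ (seen : List Int), l.Nodup → (∀ x ∈ l, x ∉ seen) →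
    altGo seen l = l := by
  induction l with
  | nil => intro seen _ _; rfl
  | cons x xs ih =>
    intro seen hnd hdis
    have hx : bump seen x = x := by
      rw [bump_eq, if_neg (hdis x (List.mem_cons_self ..))]
    simp only [altGo, hx]
    rw [ih (PySem.Set.add seen x) (List.Nodup.of_cons hnd)]
    intro y hy hmem
    rcases (PySem.Set.mem_add ..).1 hmem with h1 | h2
    · exact hdis y (List.mem_cons_of_mem x hy) h1
    · exact (List.nodup_cons.1 hnd).1 (h2 ▸ hy)

lemma ofList_append_singleton (xs : List Int) (x : Int) :
    PySem.Set.ofList (xs ++ [x]) = PySem.Set.add (PySem.Set.ofList xs) x := by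
  rw [PySem.Set.ofList_eq_foldl, PySem.Set.ofList_eq_foldl, List.foldl_append]
  rfl

lemma nodup_of_setlen_eq (xs : List Int) (h : (PySem.Set.ofList xs).length = xs.length) :
    xs.Nodup := by
  induction xs using List.reverseRecOn with
  | nil => exact List.nodup_nil
  | append_singleton xs x ih =>
    rw [ofList_append_singleton] at h
    by_cases hx : x ∈ PySem.Set.ofList xs
    · exfalso
      have hxm : x ∈ xs := (PySem.Set.mem_ofList ..).1 hx
      have hadd : PySem.Set.add (PySem.Set.ofList xs) x = PySem.Set.ofList xs := by
        simp [PySem.Set.add, hxm]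
      rw [hadd, List.length_append] at h
      simp only [List.length_singleton] at h
      have := PySem.Set.length_ofList_le xs
      omega
    · have hxxs : x ∉ xs := fun hm => hx ((PySem.Set.mem_ofList ..).2 hm)
      have hadd : PySem.Set.add (PySem.Set.ofList xs) x = PySem.Set.ofList xs ++ [x] := by
        simp [PySem.Set.add, hxxs]
      rw [hadd, List.length_append, List.length_append] at h
      have h' : (PySem.Set.ofList xs).length = xs.length := by omega
      have hnd := ih h'
      have hdisj : ∀ a ∈ xs, ¬ a = x := fun a ha hax => hxxs (hax ▸ ha)
      simp only [List.nodup_append, List.nodup_singleton, true_and]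
      refine ⟨hnd, ?_⟩
      simpa using hdisj

lemma quchongFuel_eq (n : Nat) : ∀ (arr : List Int),
    ((altGo [] arr).sum - arr.sum).toNat < n → quchongFuel n arr = altGo [] arr := by
  induction n with
  | zero => intro arr h; omega
  | succ m ih =>
    intro arr h
    simp only [quchongFuel]
    split_ifs with hc
    · have hlt := pass_measure arr (not_nodup_of_setlen _ hc)
      rw [ih _ (by omega)]
      exact (pass_inv arr).2.1
    · have hnd : (quchongPass arr).Nodup := nodup_of_setlen_eq _ (by omega)
      rw [← (pass_inv arr).2.1]
      rw [altGo_id _ [] hnd (by intro x _ hcc; cases hcc)]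

-- the greedy sum is bounded, which makes A's arithmetic fuel sufficient
lemma add_length_le (seen : List Int) (v : Int) :
    (PySem.Set.add seen v).length ≤ seen.length + 1 := by
  by_cases h : v ∈ seen <;> simp [PySem.Set.add, h]

lemma altGo_sum_le (l : List Int) : ∀ (seen : List Int),
    (altGo seen l).sum ≤ l.sum + (l.length : Int) * (seen.length + l.length) := by
  induction l with
  | nil => intro seen; simp [altGo]
  | cons x xs ih =>
    intro seen
    simp only [altGo, List.sum_cons, List.length_cons]
    have h1 := bump_le_len seen x
    have h2 := ih (PySem.Set.add seen (bump seen x))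
    have h3 := add_length_le seen (bump seen x)
    have h3' : ((PySem.Set.add seen (bump seen x)).length : Int) ≤ (seen.length : Int) + 1 := by
      exact_mod_cast h3
    have hm : (xs.length : Int) * ((PySem.Set.add seen (bump seen x)).length + xs.length)
        ≤ (xs.length : Int) * ((seen.length : Int) + 1 + xs.length) := by
      apply mul_le_mul_of_nonneg_left _ (by positivity)
      omega
    push_cast
    nlinarith [h1, h2, hm]

lemma le_foldl_max (l : List Int) (c : Int) : c ≤ l.foldl max c := by
  induction l generalizing c with
  | nil => exact le_rfl
  | cons y ys ih => exact le_trans (le_max_left c y) (ih _)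

lemma mem_le_foldl_max (l : List Int) (c : Int) (x : Int) (hx : x ∈ l) : x ≤ l.foldl max c := by
  induction l generalizing c with
  | nil => cases hx
  | cons y ys ih =>
    simp only [List.foldl_cons]
    rcases List.mem_cons.1 hx with rfl | hmem
    · exact le_trans (le_max_right c x) (le_foldl_max ys _)
    · exact ih (max c y) hmem

lemma sum_le_len_mul_max (l : List Int) : l.sum ≤ (l.length : Int) * (l.foldl max 0) := by
  have h := List.sum_le_card_nsmul l (l.foldl max 0) (fun x hx => mem_le_foldl_max l 0 x hx)
  simpa [nsmul_eq_mul] using h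

lemma quchong_main (arr : List Int) : quchong arr = quchong_alt arr := by
  unfold quchong quchong_alt
  have hempty : (PySem.Set.empty : PySem.Set Int) = ([] : List Int) := rfl
  rw [hempty]
  apply quchongFuel_eq
  have h1 := altGo_sum_le arr []
  have h2 := sum_le_len_mul_max arr
  have h3 := greedy_sum_ge arr []
  simp only [List.length_nil, Nat.cast_zero, zero_add] at h1
  have hK : (altGo [] arr).sum - arr.sum
      ≤ (arr.length : Int) * (arr.foldl max 0 + arr.length) - arr.sum := by nlinarith
  omega

-- ===== VERDICT =====
theorem quchong_spec : Claim_equal_quchong := by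
  intro arr _
  unfold Spec_quchong
  exact quchong_main arr
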